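-- pv_equiv track=rewrite | github.com/ohadren-source/rilie-net | what does it all mean.py | _compute_object
-- ===== SOURCE A (Python) =====
-- from typing import Optional, Tuple, List, Dict, Any
--
-- STOPWORDS = frozenset({
--     "the", "a", "an", "is", "are", "was", "were", "be", "been", "being",
--     "have", "has", "had", "do", "does", "did", "will", "would", "could",
--     "should", "may", "might", "shall", "can", "need", "dare", "ought",
--     "to", "of", "in", "for", "on", "with", "at", "by", "from", "as",
--     "into", "through", "during", "before", "after", "above", "below",
--     "between", "out", "off", "over", "under", "again", "further", "then",
--     "once", "here", "there", "when", "where", "why", "how", "all", "each",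
--     "every", "both", "few", "more", "most", "other", "some", "such", "no",
--     "nor", "not", "only", "own", "same", "so", "than", "too", "very",
--     "just", "because", "but", "and", "or", "if", "while", "although",
--     "this", "that", "these", "those", "i", "me", "my", "myself", "we",
--     "our", "ours", "you", "your", "yours", "he", "him", "his", "she",
--     "her", "hers", "it", "its", "they", "them", "their", "what", "which",
--     "who", "whom", "up", "about", "also", "like", "um", "uh", "well",
--     "yeah", "okay", "ok", "right", "know", "think", "got", "get",
--     "really", "actually", "basically", "literally", "just", "thing",
-- })
--
-- ABSTRACT_NOUNS = frozenset({
--     "truth", "beauty", "justice", "freedom", "love", "hate", "fear",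
--     "meaning", "purpose", "identity", "consciousness", "existence",
--     "reality", "time", "space", "energy", "entropy", "emergence",
--     "intelligence", "wisdom", "knowledge", "understanding", "signal",
--     "quality", "integrity", "dignity", "compassion", "courage",
--     "creativity", "curiosity", "mystery", "complexity", "simplicity",
--     "alignment", "coherence", "resonance", "compression", "elegance",
-- })
--
-- def _compute_object(tokens: List[str], raw: str) -> str:
--     """
--     What is this about at the most irreducible level?
--     Not topic. Not keywords. The THING underneath.
--
--     Without spaCy: extract non-stopword nouns/noun-like tokens,
--     then compress by merging tokens that point at the same concept.
--     """
--     lower = raw.lower()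
--     meaningful = [t for t in tokens if t.lower() not in STOPWORDS and len(t) > 2]
--
--     if not meaningful:
--         return "unknown"
--
--     # Concept clusters — tokens that collapse into one idea
--     CONCEPT_MERGES = {
--         # alignment family
--         frozenset({"code", "values", "architecture", "reflects", "design", "ethics"}): "alignment",
--         frozenset({"right", "wrong", "moral", "ethics", "justice", "fair"}): "ethics",
--         # identity family
--         frozenset({"who", "am", "identity", "self", "person", "me"}): "identity",
--         # creation family
--         frozenset({"build", "make", "create", "code", "write", "design", "built"}): "creation",
--         # understanding family
--         frozenset({"understand", "meaning", "explain", "why", "how", "know", "learn"}): "understanding",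
--         # connection family
--         frozenset({"love", "relationship", "family", "together", "bond", "connect"}): "connection",
--         # struggle family
--         frozenset({"fight", "struggle", "hard", "pain", "hurt", "suffer", "battle"}): "struggle",
--         # beauty family
--         frozenset({"beauty", "beautiful", "elegant", "grace", "art", "aesthetic"}): "beauty",
--         # truth family
--         frozenset({"truth", "real", "honest", "genuine", "authentic", "true"}): "truth",
--         # signal family
--         frozenset({"signal", "noise", "quality", "filter", "clarity", "clear"}): "signal",
--         # emergence family
--         frozenset({"emerge", "emergence", "pattern", "arise", "grow", "evolve"}): "emergence",
--         # compression family
--         frozenset({"compress", "compression", "reduce", "simple", "minimal", "dense"}): "compression",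
--     }
--
--     # Check which concept clusters activate
--     meaningful_set = set(t.lower() for t in meaningful)
--     best_merge = None
--     best_overlap = 0
--
--     for cluster_keys, concept in CONCEPT_MERGES.items():
--         overlap = len(meaningful_set & cluster_keys)
--         if overlap > best_overlap:
--             best_overlap = overlap
--             best_merge = concept
--
--     if best_merge and best_overlap >= 2:
--         return best_merge
--
--     # No cluster match — return the most "heavy" single token
--     # Prefer abstract nouns > concrete nouns > verbs
--     for token in meaningful:
--         if token.lower() in ABSTRACT_NOUNS:
--             return token.lower()
--
--     # Fall back to longest meaningful token (crude but honest)
--     return max(meaningful, key=len).lower()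
-- ===== SOURCE B (Python) =====
-- from typing import List
--
-- STOPWORDS = frozenset({
--     "the", "a", "an", "is", "are", "was", "were", "be", "been", "being",
--     "have", "has", "had", "do", "does", "did", "will", "would", "could",
--     "should", "may", "might", "shall", "can", "need", "dare", "ought",
--     "to", "of", "in", "for", "on", "with", "at", "by", "from", "as",
--     "into", "through", "during", "before", "after", "above", "below",
--     "between", "out", "off", "over", "under", "again", "further", "then",
--     "once", "here", "there", "when", "where", "why", "how", "all", "each",
--     "every", "both", "few", "more", "most", "other", "some", "such", "no",
--     "nor", "not", "only", "own", "same", "so", "than", "too", "very",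
--     "just", "because", "but", "and", "or", "if", "while", "although",
--     "this", "that", "these", "those", "i", "me", "my", "myself", "we",
--     "our", "ours", "you", "your", "yours", "he", "him", "his", "she",
--     "her", "hers", "it", "its", "they", "them", "their", "what", "which",
--     "who", "whom", "up", "about", "also", "like", "um", "uh", "well",
--     "yeah", "okay", "ok", "right", "know", "think", "got", "get",
--     "really", "actually", "basically", "literally", "just", "thing",
-- })
--
-- ABSTRACT_NOUNS = frozenset({
--     "truth", "beauty", "justice", "freedom", "love", "hate", "fear",
--     "meaning", "purpose", "identity", "consciousness", "existence",
--     "reality", "time", "space", "energy", "entropy", "emergence",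
--     "intelligence", "wisdom", "knowledge", "understanding", "signal",
--     "quality", "integrity", "dignity", "compassion", "courage",
--     "creativity", "curiosity", "mystery", "complexity", "simplicity",
--     "alignment", "coherence", "resonance", "compression", "elegance",
-- })
--
-- # The concept clusters, flattened to (keyword, concept) pairs in cluster order.
-- CONCEPT_WORD_PAIRS = [
--     ("code", "alignment"), ("values", "alignment"), ("architecture", "alignment"),
--     ("reflects", "alignment"), ("design", "alignment"), ("ethics", "alignment"),
--     ("right", "ethics"), ("wrong", "ethics"), ("moral", "ethics"),
--     ("ethics", "ethics"), ("justice", "ethics"), ("fair", "ethics"),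
--     ("who", "identity"), ("am", "identity"), ("identity", "identity"),
--     ("self", "identity"), ("person", "identity"), ("me", "identity"),
--     ("build", "creation"), ("make", "creation"), ("create", "creation"),
--     ("code", "creation"), ("write", "creation"), ("design", "creation"), ("built", "creation"),
--     ("understand", "understanding"), ("meaning", "understanding"), ("explain", "understanding"),
--     ("why", "understanding"), ("how", "understanding"), ("know", "understanding"), ("learn", "understanding"),
--     ("love", "connection"), ("relationship", "connection"), ("family", "connection"),
--     ("together", "connection"), ("bond", "connection"), ("connect", "connection"),
--     ("fight", "struggle"), ("struggle", "struggle"), ("hard", "struggle"),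
--     ("pain", "struggle"), ("hurt", "struggle"), ("suffer", "struggle"), ("battle", "struggle"),
--     ("beauty", "beauty"), ("beautiful", "beauty"), ("elegant", "beauty"),
--     ("grace", "beauty"), ("art", "beauty"), ("aesthetic", "beauty"),
--     ("truth", "truth"), ("real", "truth"), ("honest", "truth"),
--     ("genuine", "truth"), ("authentic", "truth"), ("true", "truth"),
--     ("signal", "signal"), ("noise", "signal"), ("quality", "signal"),
--     ("filter", "signal"), ("clarity", "signal"), ("clear", "signal"),
--     ("emerge", "emergence"), ("emergence", "emergence"), ("pattern", "emergence"),
--     ("arise", "emergence"), ("grow", "emergence"), ("evolve", "emergence"),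
--     ("compress", "compression"), ("compression", "compression"), ("reduce", "compression"),
--     ("simple", "compression"), ("minimal", "compression"), ("dense", "compression"),
-- ]
--
-- CONCEPT_ORDER = ["alignment", "ethics", "identity", "creation", "understanding",
--                  "connection", "struggle", "beauty", "truth", "signal",
--                  "emergence", "compression"]
--
-- def _compute_object(tokens: List[str], raw: str) -> str:
--     raw.lower()
--     # keep (token, lowered-token) pairs that pass the meaningfulness filter
--     kept = []
--     for t in tokens:
--         tl = t.lower()
--         if tl not in STOPWORDS and len(t) > 2:
--             kept.append((t, tl))
--     if not kept:
--         return "unknown"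
--
--     # inverted index: keyword -> concepts of the clusters containing it
--     index = {}
--     for w, c in CONCEPT_WORD_PAIRS:
--         index.setdefault(w, []).append(c)
--
--     # distinct lowered tokens, first occurrences in order
--     distinct = []
--     seen = set()
--     for _, tl in kept:
--         if tl not in seen:
--             seen.add(tl)
--             distinct.append(tl)
--
--     # per-concept overlap counters, one index lookup per distinct token
--     counts = {}
--     for tl in distinct:
--         for c in index.get(tl, []):
--             counts[c] = counts.get(c, 0) + 1
--
--     # first concept (cluster order) whose count strictly exceeds the running
--     # high-water mark, which starts at 1: a winner exists iff some count >= 2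
--     winner, hi = None, 1
--     for c in CONCEPT_ORDER:
--         n = counts.get(c, 0)
--         if n > hi:
--             winner, hi = c, n
--     if winner is not None:
--         return winner
--
--     for _, tl in kept:
--         if tl in ABSTRACT_NOUNS:
--             return tl
--
--     best = kept[0]
--     for p in kept[1:]:
--         if len(p[0]) > len(best[0]):
--             best = p
--     return best[1]
-- ===== Notes on version B (the rewrite author's own statement) =====
-- stated objective: alternative
-- what changed: Replaces A's per-cluster set-intersection scan with an inverted keyword-to-concept index built from a flat pair list plus per-concept counters filled in one pass over the distinct lowered tokens, folds the >=2 threshold into a running maximum seeded at 1, and carries (token, lowered) pairs so the fallbacks are explicit loops instead of find?/max over re-lowered tokens.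
import Mathlib
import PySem

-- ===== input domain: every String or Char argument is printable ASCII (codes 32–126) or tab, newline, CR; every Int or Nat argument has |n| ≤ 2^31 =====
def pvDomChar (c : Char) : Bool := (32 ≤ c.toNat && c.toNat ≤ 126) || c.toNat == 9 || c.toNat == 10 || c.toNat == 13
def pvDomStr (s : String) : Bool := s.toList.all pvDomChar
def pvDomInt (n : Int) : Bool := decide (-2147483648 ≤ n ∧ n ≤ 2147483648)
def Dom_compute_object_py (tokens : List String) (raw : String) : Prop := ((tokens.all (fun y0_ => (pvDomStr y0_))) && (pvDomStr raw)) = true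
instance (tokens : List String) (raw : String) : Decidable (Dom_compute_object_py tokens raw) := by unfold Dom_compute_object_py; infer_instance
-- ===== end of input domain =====

-- B replaces A's per-cluster set-intersection scan by an inverted keyword->concept index built
-- from a flat pair list, per-concept counters filled in one pass over the distinct lowered tokens,
-- and a threshold-seeded running-maximum selection; fallbacks are explicit loops over
-- (token, lowered) pairs instead of find?/max over the token list (objective: alternative).

-- shared module constants (STOPWORDS, ABSTRACT_NOUNS), identical in both Pythons
def pvStop : PySem.Set String := ["a", "about", "above", "actually", "after", "again", "all", "also", "although", "an", "and", "are", "as", "at", "basically", "be", "because", "been", "before", "being", "below", "between", "both", "but", "by", "can", "could", "dare", "did", "do", "does", "during", "each", "every", "few", "for", "from", "further", "get", "got", "had", "has", "have", "he", "her", "here", "hers", "him", "his", "how", "i", "if", "in", "into", "is", "it", "its", "just", "know", "like", "literally", "may", "me", "might", "more", "most", "my", "myself", "need", "no", "nor", "not", "of", "off", "ok", "okay", "on", "once", "only", "or", "other", "ought", "our", "ours", "out", "over", "own", "really", "right", "same", "shall", "she", "should", "so", "some", "such", "than", "that", "the", "their", "them", "then", "there", "these", "they", "thing", "think", "this", "those",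 "through", "to", "too", "uh", "um", "under", "up", "very", "was", "we", "well", "were", "what", "when", "where", "which", "while", "who", "whom", "why", "will", "with", "would", "yeah", "you", "your", "yours"]

def pvAbstract : PySem.Set String := ["alignment", "beauty", "coherence", "compassion", "complexity", "compression", "consciousness", "courage", "creativity", "curiosity", "dignity", "elegance", "emergence", "energy", "entropy", "existence", "fear", "freedom", "hate", "identity", "integrity", "intelligence", "justice", "knowledge", "love", "meaning", "mystery", "purpose", "quality", "reality", "resonance", "signal", "simplicity", "space", "time", "truth", "understanding", "wisdom"]

-- ===== PORT A =====
-- A's CONCEPT_MERGES: frozenset keys in insertion order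
def pvClusters : List (PySem.Set String × String) := [
  (PySem.Set.ofList ["code", "values", "architecture", "reflects", "design", "ethics"], "alignment"),
  (PySem.Set.ofList ["right", "wrong", "moral", "ethics", "justice", "fair"], "ethics"),
  (PySem.Set.ofList ["who", "am", "identity", "self", "person", "me"], "identity"),
  (PySem.Set.ofList ["build", "make", "create", "code", "write", "design", "built"], "creation"),
  (PySem.Set.ofList ["understand", "meaning", "explain", "why", "how", "know", "learn"], "understanding"),
  (PySem.Set.ofList ["love", "relationship", "family", "together", "bond", "connect"], "connection"),
  (PySem.Set.ofList ["fight", "struggle", "hard", "pain", "hurt", "suffer", "battle"], "struggle"),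
  (PySem.Set.ofList ["beauty", "beautiful", "elegant", "grace", "art", "aesthetic"], "beauty"),
  (PySem.Set.ofList ["truth", "real", "honest", "genuine", "authentic", "true"], "truth"),
  (PySem.Set.ofList ["signal", "noise", "quality", "filter", "clarity", "clear"], "signal"),
  (PySem.Set.ofList ["emerge", "emergence", "pattern", "arise", "grow", "evolve"], "emergence"),
  (PySem.Set.ofList ["compress", "compression", "reduce", "simple", "minimal", "dense"], "compression")]

def compute_object_py (tokens : List String) (raw : String) : String :=
  let _lower := PySem.Str.lower raw
  let meaningful := tokens.filter (fun t => (!(PySem.Set.contains pvStop (PySem.Str.lower t))) && decide (2 < PySem.Str.len t))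
  if meaningful.isEmpty then "unknown" else
  let msetA : PySem.Set String := PySem.Set.ofList (meaningful.map (fun t => PySem.Str.lower t))
  let best := pvClusters.foldl (fun (acc : Option String × Int) p =>
      let overlap : Int := PySem.Set.len (PySem.Set.inter msetA p.1)
      if acc.2 < overlap then (some p.2, overlap) else acc) (none, 0)
  if best.1.isSome && decide (2 ≤ best.2) then best.1.getD "" else
  match meaningful.find? (fun t => PySem.Set.contains pvAbstract (PySem.Str.lower t)) with
  | some t => PySem.Str.lower t
  | none => PySem.Str.lower ((PySem.List.max? meaningful (fun t => PySem.Str.len t)).getD "")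

-- ===== PORT B =====
-- B's CONCEPT_WORD_PAIRS: the clusters flattened to (keyword, concept) pairs
def bPairs : List (String × String) := [
  ("code", "alignment"), ("values", "alignment"), ("architecture", "alignment"),
  ("reflects", "alignment"), ("design", "alignment"), ("ethics", "alignment"),
  ("right", "ethics"), ("wrong", "ethics"), ("moral", "ethics"),
  ("ethics", "ethics"), ("justice", "ethics"), ("fair", "ethics"),
  ("who", "identity"), ("am", "identity"), ("identity", "identity"),
  ("self", "identity"), ("person", "identity"), ("me", "identity"),
  ("build", "creation"), ("make", "creation"), ("create", "creation"),
  ("code", "creation"), ("write", "creation"), ("design", "creation"), ("built", "creation"),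
  ("understand", "understanding"), ("meaning", "understanding"), ("explain", "understanding"),
  ("why", "understanding"), ("how", "understanding"), ("know", "understanding"), ("learn", "understanding"),
  ("love", "connection"), ("relationship", "connection"), ("family", "connection"),
  ("together", "connection"), ("bond", "connection"), ("connect", "connection"),
  ("fight", "struggle"), ("struggle", "struggle"), ("hard", "struggle"),
  ("pain", "struggle"), ("hurt", "struggle"), ("suffer", "struggle"), ("battle", "struggle"),
  ("beauty", "beauty"), ("beautiful", "beauty"), ("elegant", "beauty"),
  ("grace", "beauty"), ("art", "beauty"), ("aesthetic", "beauty"),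
  ("truth", "truth"), ("real", "truth"), ("honest", "truth"),
  ("genuine", "truth"), ("authentic", "truth"), ("true", "truth"),
  ("signal", "signal"), ("noise", "signal"), ("quality", "signal"),
  ("filter", "signal"), ("clarity", "signal"), ("clear", "signal"),
  ("emerge", "emergence"), ("emergence", "emergence"), ("pattern", "emergence"),
  ("arise", "emergence"), ("grow", "emergence"), ("evolve", "emergence"),
  ("compress", "compression"), ("compression", "compression"), ("reduce", "compression"),
  ("simple", "compression"), ("minimal", "compression"), ("dense", "compression")]

def bConcepts : List String := ["alignment", "ethics", "identity", "creation", "understanding",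
  "connection", "struggle", "beauty", "truth", "signal", "emergence", "compression"]

-- the meaningfulness filter producing (token, lowered-token) pairs
def bKept : List String → List (String × String)
  | [] => []
  | t :: ts =>
      let tl := PySem.Str.lower t
      if (!(PySem.Set.contains pvStop tl)) && decide (2 < PySem.Str.len t)
      then (t, tl) :: bKept ts else bKept ts

-- inverted index: keyword -> concepts of the clusters containing it
def bIndex : PySem.Dict String (List String) :=
  bPairs.foldl (fun d p => d.modify p.1 [] (fun l => l ++ [p.2])) PySem.Dict.empty

-- per-concept counters, one index lookup per distinct lowered token
def bCounts (ds : List String) : PySem.Dict String Int :=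
  ds.foldl (fun cs tl =>
    (PySem.Dict.getD bIndex tl []).foldl (fun cs c => cs.insert c (cs.getD c 0 + 1)) cs) PySem.Dict.empty

-- running maximum seeded at 1: a winner exists iff some count reaches 2
def bSelect (cs : PySem.Dict String Int) : Option String × Int :=
  bConcepts.foldl (fun (acc : Option String × Int) c =>
    let n := PySem.Dict.getD cs c 0
    if acc.2 < n then (some c, n) else acc) (none, 1)

-- fallback 1: first abstract-noun token, already lowered
def bAbstract : List (String × String) → Option String
  | [] => none
  | p :: ps => if PySem.Set.contains pvAbstract p.2 then some p.2 else bAbstract ps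

-- fallback 2: first longest token, returned lowered
def bLongest : String × String → List (String × String) → String
  | best, [] => best.2
  | best, p :: ps =>
      if PySem.Str.len best.1 < PySem.Str.len p.1 then bLongest p ps else bLongest best ps

def compute_object_py_alt (tokens : List String) (raw : String) : String :=
  let _lowerRaw := PySem.Str.lower raw
  match bKept tokens with
  | [] => "unknown"
  | k0 :: ks =>
      let distinct : PySem.Set String := PySem.Set.ofList ((k0 :: ks).map Prod.snd)
      match (bSelect (bCounts distinct)).1 with
      | some c => c
      | none =>
          match bAbstract (k0 :: ks) with
          | some tl => tl
          | none => bLongest k0 ks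

-- ===== PRECONDITION & SPEC =====
def Spec_compute_object_py (tokens : List String) (raw : String) (out : String) : Prop := out = compute_object_py_alt tokens raw
instance (tokens : List String) (raw : String) (out : String) : Decidable (Spec_compute_object_py tokens raw out) := by unfold Spec_compute_object_py; infer_instance

-- ===== CLAIM (what is proved, stated in full; the proofs are below) =====
def Claim_equal_compute_object_py : Prop := ∀ (tokens : List String) (raw : String), Dom_compute_object_py tokens raw → Spec_compute_object_py tokens raw (compute_object_py tokens raw)

-- ===== LEMMAS AND PROOFS =====

set_option maxRecDepth 8192

-- proof-side abbreviations
def pvG (t : String) : String × String := (t, PySem.Str.lower t)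
def pvClustersPlain : List (List String × String) := [
  (["code", "values", "architecture", "reflects", "design", "ethics"], "alignment"),
  (["right", "wrong", "moral", "ethics", "justice", "fair"], "ethics"),
  (["who", "am", "identity", "self", "person", "me"], "identity"),
  (["build", "make", "create", "code", "write", "design", "built"], "creation"),
  (["understand", "meaning", "explain", "why", "how", "know", "learn"], "understanding"),
  (["love", "relationship", "family", "together", "bond", "connect"], "connection"),
  (["fight", "struggle", "hard", "pain", "hurt", "suffer", "battle"], "struggle"),
  (["beauty", "beautiful", "elegant", "grace", "art", "aesthetic"], "beauty"),
  (["truth", "real", "honest", "genuine", "authentic", "true"], "truth"),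
  (["signal", "noise", "quality", "filter", "clarity", "clear"], "signal"),
  (["emerge", "emergence", "pattern", "arise", "grow", "evolve"], "emergence"),
  (["compress", "compression", "reduce", "simple", "minimal", "dense"], "compression")]

lemma bKept_eq (tokens : List String) :
    bKept tokens
      = (tokens.filter (fun t => (!(PySem.Set.contains pvStop (PySem.Str.lower t))) && decide (2 < PySem.Str.len t))).map pvG := by
  induction tokens with
  | nil => rfl
  | cons t ts ih =>
    show (if ((!(PySem.Set.contains pvStop (PySem.Str.lower t))) && decide (2 < PySem.Str.len t)) = true
          then (t, PySem.Str.lower t) :: bKept ts else bKept ts) = _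
    rw [List.filter_cons]
    by_cases h : ((!(PySem.Set.contains pvStop (PySem.Str.lower t))) && decide (2 < PySem.Str.len t)) = true
    · rw [if_pos h, if_pos h, List.map_cons, ih]
      rfl
    · rw [if_neg h, if_neg h, ih]

lemma max?_from_head (key : String → Int) (ms : List String) (x : String) :
    PySem.List.max? (x :: ms) key
      = some (ms.foldl (fun b y => if key b < key y then y else b) x) := by
  simp only [PySem.List.max?, List.foldl_cons]
  induction ms generalizing x with
  | nil => rfl
  | cons y ms ih =>
    simp only [List.foldl_cons]
    by_cases h : key x < key y
    · rw [if_pos h, if_pos h]; exact ih y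
    · rw [if_neg h, if_neg h]; exact ih x

lemma bLongest_map (ms : List String) : ∀ x : String,
    bLongest (pvG x) (ms.map pvG)
      = PySem.Str.lower (ms.foldl (fun b y => if PySem.Str.len b < PySem.Str.len y then y else b) x) := by
  induction ms with
  | nil => intro x; rfl
  | cons y ms ih =>
    intro x
    simp only [List.map_cons, bLongest, List.foldl_cons, pvG]
    by_cases h : PySem.Str.len x < PySem.Str.len y
    · rw [if_pos h, if_pos h]; exact ih y
    · rw [if_neg h, if_neg h]; exact ih x

lemma bAbstract_map (M : List String) :
    bAbstract (M.map pvG)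
      = (M.find? (fun t => PySem.Set.contains pvAbstract (PySem.Str.lower t))).map (fun t => PySem.Str.lower t) := by
  induction M with
  | nil => rfl
  | cons t M ih =>
    simp only [List.map_cons, bAbstract, pvG]
    by_cases h : PySem.Set.contains pvAbstract (PySem.Str.lower t) = true
    · rw [if_pos h,
          show List.find? (fun t => PySem.Set.contains pvAbstract (PySem.Str.lower t)) (t :: M) = some t from
            List.find?_cons_of_pos (p := fun t => PySem.Set.contains pvAbstract (PySem.Str.lower t)) h]
      rfl
    · rw [if_neg h, List.find?_cons_of_neg (by simpa using h)]
      exact ih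

lemma bCountsFold (ds : List String) : ∀ (d : PySem.Dict String Int) (c : String),
    (ds.foldl (fun cs tl =>
        (PySem.Dict.getD bIndex tl []).foldl (fun cs c => cs.insert c (cs.getD c 0 + 1)) cs) d).getD c 0
      = d.getD c 0 + (ds.map (fun tl => ((PySem.Dict.getD bIndex tl []).count c : Int))).sum := by
  induction ds with
  | nil => intro d c; simp
  | cons tl ds ih =>
    intro d c
    simp only [List.foldl_cons, List.map_cons, List.sum_cons]
    rw [ih, PySem.Dict.getD_foldl_insert_add_one]
    ring

lemma pvSwapCount (L : List (String × String)) (tl c : String) :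
    ((L.filter (fun p => p.1 == tl)).map Prod.snd).count c
      = ((L.filter (fun p => p.2 == c)).map Prod.fst).count tl := by
  induction L with
  | nil => rfl
  | cons p L ih =>
    simp only [List.filter_cons]
    by_cases h1 : p.1 = tl <;> by_cases h2 : p.2 = c <;>
      simp [h1, h2, ih]

lemma bIndexGet (tl : String) :
    PySem.Dict.getD bIndex tl [] = (bPairs.filter (fun p => p.1 == tl)).map Prod.snd := by
  have h := PySem.Dict.getD_foldl_modify_append (l := bPairs) (d := (PySem.Dict.empty : PySem.Dict String (List String))) (c := tl)
  simpa [bIndex] using h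

lemma pvNodupCount {W : List String} (hW : W.Nodup) (tl : String) :
    W.count tl = if W.contains tl then 1 else 0 := by
  by_cases h : tl ∈ W
  · rw [if_pos (by simpa using h)]
    exact List.count_eq_one_of_mem hW h
  · rw [if_neg (by simpa using h)]
    exact List.count_eq_zero.mpr h

-- B's counter value at a concept is A's overlap of the token set with that concept's cluster
lemma pvKey (low : List String) (W : List String) (c : String) (hW : W.Nodup)
    (hcount : ∀ tl, (PySem.Dict.getD bIndex tl []).count c = W.count tl) :
    (bCounts (PySem.Set.ofList low)).getD c 0
      = PySem.Set.len (PySem.Set.inter (PySem.Set.ofList low) W) := by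
  unfold bCounts
  rw [bCountsFold]
  have h0 : (PySem.Dict.empty : PySem.Dict String Int).getD c 0 = 0 := rfl
  rw [h0, zero_add]
  have hmap : (PySem.Set.ofList low).map (fun tl => ((PySem.Dict.getD bIndex tl []).count c : Int))
      = (PySem.Set.ofList low).map (fun tl => if List.contains W tl then (1:Int) else 0) := by
    apply List.map_congr_left
    intro tl _
    rw [hcount tl, pvNodupCount hW]
    norm_cast
  rw [hmap, PySem.List.sum_map_ite_one_zero (fun tl => List.contains W tl)]
  simp [PySem.Set.len, PySem.Set.inter, PySem.Set.contains_eq_listContains, List.countP_eq_length_filter]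

-- coupling of A's threshold-0 and B's threshold-1 running-maximum folds
lemma pvCouple {α : Type} (nm : α → String) (f : α → Int) (L : List α) :
    ∀ (a b : Option String × Int),
      (2 ≤ a.2 → a.1.isSome = true ∧ b = a) → (a.2 < 2 → b = (none, 1)) →
      (2 ≤ (L.foldl (fun acc x => if acc.2 < f x then (some (nm x), f x) else acc) a).2 →
          (L.foldl (fun acc x => if acc.2 < f x then (some (nm x), f x) else acc) a).1.isSome = true ∧
          L.foldl (fun acc x => if acc.2 < f x then (some (nm x), f x) else acc) b
            = L.foldl (fun acc x => if acc.2 < f x then (some (nm x), f x) else acc) a)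
      ∧ ((L.foldl (fun acc x => if acc.2 < f x then (some (nm x), f x) else acc) a).2 < 2 →
          L.foldl (fun acc x => if acc.2 < f x then (some (nm x), f x) else acc) b = (none, 1)) := by
  induction L with
  | nil =>
    intro a b h2 h1
    exact ⟨fun h => h2 h, fun h => h1 h⟩
  | cons x L ih =>
    intro a b h2 h1
    simp only [List.foldl_cons]
    by_cases ha : 2 ≤ a.2
    · obtain ⟨hs, hb⟩ := h2 ha
      rw [hb]
      apply ih
      · intro _
        constructor
        · by_cases hx : a.2 < f x
          · rw [if_pos hx]; rfl
          · rw [if_neg hx]; exact hs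
        · rfl
      · intro hlt
        exfalso
        by_cases hx : a.2 < f x
        · rw [if_pos hx] at hlt; simp at hlt; omega
        · rw [if_neg hx] at hlt; omega
    · have hb := h1 (by omega)
      rw [hb]
      by_cases hf : 2 ≤ f x
      · have hau : (if a.2 < f x then (some (nm x), f x) else a) = (some (nm x), f x) := if_pos (by omega)
        have hbu : (if ((none : Option String), (1:Int)).2 < f x then (some (nm x), f x) else ((none : Option String), (1:Int))) = (some (nm x), f x) := if_pos (by simp; omega)
        rw [hau, hbu]
        apply ih
        · intro _; exact ⟨rfl, rfl⟩
        · intro h; simp at h; omega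
      · have hbu : (if ((none : Option String), (1:Int)).2 < f x then (some (nm x), f x) else ((none : Option String), (1:Int))) = ((none : Option String), (1:Int)) := if_neg (by simp; omega)
        rw [hbu]
        apply ih
        · intro h
          exfalso
          by_cases hx : a.2 < f x
          · rw [if_pos hx] at h; simp at h; omega
          · rw [if_neg hx] at h; omega
        · intro _; rfl

lemma hc1 : ∀ tl, (PySem.Dict.getD bIndex tl []).count "alignment" = (["code", "values", "architecture", "reflects", "design", "ethics"] : List String).count tl := by
  intro tl
  rw [bIndexGet, pvSwapCount,
      show (bPairs.filter (fun p => p.2 == "alignment")).map Prod.fst = (["code", "values", "architecture", "reflects", "design", "ethics"] : List String) from by decide]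

lemma hc2 : ∀ tl, (PySem.Dict.getD bIndex tl []).count "ethics" = (["right", "wrong", "moral", "ethics", "justice", "fair"] : List String).count tl := by
  intro tl
  rw [bIndexGet, pvSwapCount,
      show (bPairs.filter (fun p => p.2 == "ethics")).map Prod.fst = (["right", "wrong", "moral", "ethics", "justice", "fair"] : List String) from by decide]

lemma hc3 : ∀ tl, (PySem.Dict.getD bIndex tl []).count "identity" = (["who", "am", "identity", "self", "person", "me"] : List String).count tl := by
  intro tl
  rw [bIndexGet, pvSwapCount,
      show (bPairs.filter (fun p => p.2 == "identity")).map Prod.fst = (["who", "am", "identity", "self", "person", "me"] : List String) from by decide]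

lemma hc4 : ∀ tl, (PySem.Dict.getD bIndex tl []).count "creation" = (["build", "make", "create", "code", "write", "design", "built"] : List String).count tl := by
  intro tl
  rw [bIndexGet, pvSwapCount,
      show (bPairs.filter (fun p => p.2 == "creation")).map Prod.fst = (["build", "make", "create", "code", "write", "design", "built"] : List String) from by decide]

lemma hc5 : ∀ tl, (PySem.Dict.getD bIndex tl []).count "understanding" = (["understand", "meaning", "explain", "why", "how", "know", "learn"] : List String).count tl := by
  intro tl
  rw [bIndexGet, pvSwapCount,
      show (bPairs.filter (fun p => p.2 == "understanding")).map Prod.fst = (["understand", "meaning", "explain", "why", "how", "know", "learn"] : List String) from by decide]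

lemma hc6 : ∀ tl, (PySem.Dict.getD bIndex tl []).count "connection" = (["love", "relationship", "family", "together", "bond", "connect"] : List String).count tl := by
  intro tl
  rw [bIndexGet, pvSwapCount,
      show (bPairs.filter (fun p => p.2 == "connection")).map Prod.fst = (["love", "relationship", "family", "together", "bond", "connect"] : List String) from by decide]

lemma hc7 : ∀ tl, (PySem.Dict.getD bIndex tl []).count "struggle" = (["fight", "struggle", "hard", "pain", "hurt", "suffer", "battle"] : List String).count tl := by
  intro tl
  rw [bIndexGet, pvSwapCount,
      show (bPairs.filter (fun p => p.2 == "struggle")).map Prod.fst = (["fight", "struggle", "hard", "pain", "hurt", "suffer", "battle"] : List String) from by decide]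

lemma hc8 : ∀ tl, (PySem.Dict.getD bIndex tl []).count "beauty" = (["beauty", "beautiful", "elegant", "grace", "art", "aesthetic"] : List String).count tl := by
  intro tl
  rw [bIndexGet, pvSwapCount,
      show (bPairs.filter (fun p => p.2 == "beauty")).map Prod.fst = (["beauty", "beautiful", "elegant", "grace", "art", "aesthetic"] : List String) from by decide]

lemma hc9 : ∀ tl, (PySem.Dict.getD bIndex tl []).count "truth" = (["truth", "real", "honest", "genuine", "authentic", "true"] : List String).count tl := by
  intro tl
  rw [bIndexGet, pvSwapCount,
      show (bPairs.filter (fun p => p.2 == "truth")).map Prod.fst = (["truth", "real", "honest", "genuine", "authentic", "true"] : List String) from by decide]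

lemma hc10 : ∀ tl, (PySem.Dict.getD bIndex tl []).count "signal" = (["signal", "noise", "quality", "filter", "clarity", "clear"] : List String).count tl := by
  intro tl
  rw [bIndexGet, pvSwapCount,
      show (bPairs.filter (fun p => p.2 == "signal")).map Prod.fst = (["signal", "noise", "quality", "filter", "clarity", "clear"] : List String) from by decide]

lemma hc11 : ∀ tl, (PySem.Dict.getD bIndex tl []).count "emergence" = (["emerge", "emergence", "pattern", "arise", "grow", "evolve"] : List String).count tl := by
  intro tl
  rw [bIndexGet, pvSwapCount,
      show (bPairs.filter (fun p => p.2 == "emergence")).map Prod.fst = (["emerge", "emergence", "pattern", "arise", "grow", "evolve"] : List String) from by decide]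

lemma hc12 : ∀ tl, (PySem.Dict.getD bIndex tl []).count "compression" = (["compress", "compression", "reduce", "simple", "minimal", "dense"] : List String).count tl := by
  intro tl
  rw [bIndexGet, pvSwapCount,
      show (bPairs.filter (fun p => p.2 == "compression")).map Prod.fst = (["compress", "compression", "reduce", "simple", "minimal", "dense"] : List String) from by decide]

-- ===== VERDICT (by name: the statement is the Claim_ definition above) =====
theorem compute_object_py_spec : Claim_equal_compute_object_py := by
  intro tokens raw _
  unfold Spec_compute_object_py compute_object_py compute_object_py_alt
  rw [bKept_eq tokens]
  cases hM : tokens.filter (fun t => (!(PySem.Set.contains pvStop (PySem.Str.lower t))) && decide (2 < PySem.Str.len t)) with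
  | nil => simp
  | cons m0 ms =>
    simp only [List.map_cons, List.isEmpty_cons, Bool.false_eq_true, if_false]
    have hsnd : (pvG m0).2 :: List.map Prod.snd (List.map pvG ms)
        = PySem.Str.lower m0 :: List.map (fun t => PySem.Str.lower t) ms := by
      simp only [List.map_map]; rfl
    rw [hsnd]
    have hAcl : List.foldl (fun (acc : Option String × Int) (p : PySem.Set String × String) =>
          if acc.2 < ((PySem.Set.ofList (PySem.Str.lower m0 :: List.map (fun t => PySem.Str.lower t) ms)).inter p.1).len
          then (some p.2, ((PySem.Set.ofList (PySem.Str.lower m0 :: List.map (fun t => PySem.Str.lower t) ms)).inter p.1).len)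
          else acc) (none, 0) pvClusters
        = List.foldl (fun (acc : Option String × Int) (p : List String × String) =>
          if acc.2 < ((PySem.Set.ofList (PySem.Str.lower m0 :: List.map (fun t => PySem.Str.lower t) ms)).inter p.1).len
          then (some p.2, ((PySem.Set.ofList (PySem.Str.lower m0 :: List.map (fun t => PySem.Str.lower t) ms)).inter p.1).len)
          else acc) (none, 0) pvClustersPlain := by
      rw [show pvClusters = pvClustersPlain from by decide]
    have hBsel : bSelect (bCounts (PySem.Set.ofList (PySem.Str.lower m0 :: List.map (fun t => PySem.Str.lower t) ms)))
        = List.foldl (fun (acc : Option String × Int) (p : List String × String) =>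
          if acc.2 < ((PySem.Set.ofList (PySem.Str.lower m0 :: List.map (fun t => PySem.Str.lower t) ms)).inter p.1).len
          then (some p.2, ((PySem.Set.ofList (PySem.Str.lower m0 :: List.map (fun t => PySem.Str.lower t) ms)).inter p.1).len)
          else acc) (none, 1) pvClustersPlain := by
      unfold bSelect
      rw [show bConcepts = pvClustersPlain.map Prod.snd from by decide, List.foldl_map]
      apply PySem.List.foldl_congr_mem
      intro acc p hp
      simp only [pvClustersPlain, List.mem_cons, List.not_mem_nil, or_false] at hp
      rcases hp with rfl|rfl|rfl|rfl|rfl|rfl|rfl|rfl|rfl|rfl|rfl|rfl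
      all_goals dsimp only
      · rw [pvKey (PySem.Str.lower m0 :: List.map (fun t => PySem.Str.lower t) ms) ["code", "values", "architecture", "reflects", "design", "ethics"] "alignment" (by decide) hc1]
      · rw [pvKey (PySem.Str.lower m0 :: List.map (fun t => PySem.Str.lower t) ms) ["right", "wrong", "moral", "ethics", "justice", "fair"] "ethics" (by decide) hc2]
      · rw [pvKey (PySem.Str.lower m0 :: List.map (fun t => PySem.Str.lower t) ms) ["who", "am", "identity", "self", "person", "me"] "identity" (by decide) hc3]
      · rw [pvKey (PySem.Str.lower m0 :: List.map (fun t => PySem.Str.lower t) ms) ["build", "make", "create", "code", "write", "design", "built"] "creation" (by decide) hc4]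
      · rw [pvKey (PySem.Str.lower m0 :: List.map (fun t => PySem.Str.lower t) ms) ["understand", "meaning", "explain", "why", "how", "know", "learn"] "understanding" (by decide) hc5]
      · rw [pvKey (PySem.Str.lower m0 :: List.map (fun t => PySem.Str.lower t) ms) ["love", "relationship", "family", "together", "bond", "connect"] "connection" (by decide) hc6]
      · rw [pvKey (PySem.Str.lower m0 :: List.map (fun t => PySem.Str.lower t) ms) ["fight", "struggle", "hard", "pain", "hurt", "suffer", "battle"] "struggle" (by decide) hc7]
      · rw [pvKey (PySem.Str.lower m0 :: List.map (fun t => PySem.Str.lower t) ms) ["beauty", "beautiful", "elegant", "grace", "art", "aesthetic"] "beauty" (by decide) hc8]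
      · rw [pvKey (PySem.Str.lower m0 :: List.map (fun t => PySem.Str.lower t) ms) ["truth", "real", "honest", "genuine", "authentic", "true"] "truth" (by decide) hc9]
      · rw [pvKey (PySem.Str.lower m0 :: List.map (fun t => PySem.Str.lower t) ms) ["signal", "noise", "quality", "filter", "clarity", "clear"] "signal" (by decide) hc10]
      · rw [pvKey (PySem.Str.lower m0 :: List.map (fun t => PySem.Str.lower t) ms) ["emerge", "emergence", "pattern", "arise", "grow", "evolve"] "emergence" (by decide) hc11]
      · rw [pvKey (PySem.Str.lower m0 :: List.map (fun t => PySem.Str.lower t) ms) ["compress", "compression", "reduce", "simple", "minimal", "dense"] "compression" (by decide) hc12]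
    obtain ⟨hge, hlt⟩ := pvCouple Prod.snd
      (fun p : List String × String =>
        ((PySem.Set.ofList (PySem.Str.lower m0 :: List.map (fun t => PySem.Str.lower t) ms)).inter p.1).len)
      pvClustersPlain (none, 0) (none, 1)
      (by intro h; norm_num at h) (fun _ => rfl)
    by_cases hw : 2 ≤ (List.foldl (fun (acc : Option String × Int) (p : List String × String) =>
          if acc.2 < ((PySem.Set.ofList (PySem.Str.lower m0 :: List.map (fun t => PySem.Str.lower t) ms)).inter p.1).len
          then (some p.2, ((PySem.Set.ofList (PySem.Str.lower m0 :: List.map (fun t => PySem.Str.lower t) ms)).inter p.1).len)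
          else acc) (none, 0) pvClustersPlain).2
    · obtain ⟨hsome, heq⟩ := hge hw
      obtain ⟨w, hww⟩ := Option.isSome_iff_exists.mp hsome
      rw [hAcl, hBsel, heq, hww]
      simp only [Option.isSome_some, Bool.true_and]
      rw [decide_eq_true hw, if_pos rfl]
      rfl
    · have hb1 := hlt (by omega)
      rw [hAcl, hBsel, hb1]
      rw [if_neg (by simp only [Bool.and_eq_true, decide_eq_true_eq, not_and]; exact fun _ => hw)]
      rw [show pvG m0 :: List.map pvG ms = List.map pvG (m0 :: ms) from rfl]
      rw [bAbstract_map (m0 :: ms)]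
      cases hf : List.find? (fun t => PySem.Set.contains pvAbstract (PySem.Str.lower t)) (m0 :: ms) with
      | some t => rfl
      | none =>
        rw [max?_from_head, bLongest_map ms m0]
        rfl
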